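-- pv_equiv track=rewrite | github.com/momosecurity/Mloger | server/utils/ProtocUtil.py | GetDynamicWireFormat
-- ===== SOURCE A (Python) =====
-- def GetDynamicWireFormat(data, start, end):
--     wire_type = data[start] & 0x7
--     firstByte = data[start]
--     if (firstByte & 0x80) == 0:
--         field_number = (firstByte >> 3)
--         return (start + 1, wire_type, field_number)
--     else:
--         byteList = []
--         pos = 0
--         while True:
--             if start + pos >= end:
--                 return (None, None, None)
--             oneByte = data[start + pos]
--             byteList.append(oneByte & 0x7F)
--             pos = pos + 1
--             if oneByte & 0x80 == 0x0:
--                 break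
--
--         newStart = start + pos
--
--         index = len(byteList) - 1
--         field_number = 0
--         while index >= 0:
--             field_number = (field_number << 0x7) + byteList[index]
--             index = index - 1
--
--         field_number = (field_number >> 3)
--         return (newStart, wire_type, field_number)
-- ===== SOURCE B (Python) =====
-- def GetDynamicWireFormat(data, start, end):
--     firstByte = data[start]
--     wire_type = firstByte & 0x7
--     if firstByte & 0x80 == 0:
--         return (start + 1, wire_type, firstByte >> 3)
--
--     def decode(pos):
--         # returns None on running past `end`, else (next pos offset, little-endian value)
--         if start + pos >= end:
--             return None
--         b = data[start + pos]
--         if b & 0x80 == 0: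
--             return (pos + 1, b & 0x7F)
--         rest = decode(pos + 1)
--         if rest is None:
--             return None
--         p, v = rest
--         return (p, (b & 0x7F) + (v << 7))
--
--     r = decode(0)
--     if r is None:
--         return (None, None, None)
--     p, v = r
--     return (start + p, wire_type, v >> 3)
-- ===== Notes on version B (the rewrite author's own statement) =====
-- stated objective: alternative
-- what changed: B replaces A's two-phase decode (collect a byteList in a while loop, then a second reverse-order shift-and-add loop) with one recursive helper that combines each masked byte with the recursively decoded tail ((b & 0x7F) + (tail << 7)) on the way back, so no intermediate list and no second loop exist.
import Mathlib
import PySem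

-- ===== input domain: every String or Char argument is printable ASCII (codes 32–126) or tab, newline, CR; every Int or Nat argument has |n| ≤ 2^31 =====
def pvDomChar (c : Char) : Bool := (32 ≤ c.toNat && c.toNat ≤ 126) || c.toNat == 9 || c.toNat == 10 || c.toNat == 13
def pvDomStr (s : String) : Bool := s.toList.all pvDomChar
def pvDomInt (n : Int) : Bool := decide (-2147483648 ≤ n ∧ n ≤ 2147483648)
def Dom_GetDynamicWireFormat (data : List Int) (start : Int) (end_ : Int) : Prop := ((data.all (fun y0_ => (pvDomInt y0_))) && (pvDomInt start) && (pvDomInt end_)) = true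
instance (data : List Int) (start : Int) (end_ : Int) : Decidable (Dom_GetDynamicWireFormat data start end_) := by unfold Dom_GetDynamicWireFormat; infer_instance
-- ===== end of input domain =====

-- B replaces A's byte-list collection plus a second reverse-order reconstruction loop by one
-- recursive decode that combines (b & 0x7F) + (tail << 7) on the way back; return values proved equal.

-- ===== PORT A =====
-- the 'while True' scan of A: collects byteList; fuel = (end_ - start).toNat - pos, so fuel = 0
-- exactly when A's guard 'start + pos >= end' fires (the (None,None,None) return).
-- result 'none' = the IndexError of data[start + pos] (excluded by Pre_).
def pvLoopA (data : List Int) (start wire : Int) (byteList : List Int) (pos : Int) :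
    Nat → Option (Option Int × Option Int × Option Int)
  | 0 => some (none, none, none)
  | fuel + 1 =>
    match PySem.List.pyGet? data (start + pos) with
    | none => none
    | some oneByte =>
      let byteList := byteList ++ [PySem.Int.band oneByte 0x7F]
      let pos := pos + 1
      if PySem.Int.band oneByte 0x80 = 0 then
        -- A's second loop: index from len-1 down to 0, field = (field << 7) + byteList[index]
        let field := byteList.reverse.foldl (fun (acc b : Int) => (acc <<< (7 : Nat)) + b) 0
        some (some (start + pos), some wire, some (field >>> (3 : Nat)))
      else
        pvLoopA data start wire byteList pos fuel

def GetDynamicWireFormat (data : List Int) (start : Int) (end_ : Int) : Option Int × Option Int × Option Int :=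
  match PySem.List.pyGet? data start with
  | none => (none, none, none)  -- data[start] raises IndexError: outside Pre_
  | some firstByte =>
    let wire_type := PySem.Int.band firstByte 0x7
    if PySem.Int.band firstByte 0x80 = 0 then
      (some (start + 1), some wire_type, some (firstByte >>> (3 : Nat)))
    else
      (pvLoopA data start wire_type [] 0 (end_ - start).toNat).getD (none, none, none)

-- ===== PORT B =====
-- B's recursive `decode`: outer `none` = IndexError (outside Pre_), `some none` = Python's None
-- (ran past end), `some (some (p, v))` = (offset past terminator, little-endian value).
-- fuel = (end_ - start).toNat - pos: fuel = 0 exactly when 'start + pos >= end'.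
def pvDecodeB (data : List Int) (start : Int) (pos : Int) :
    Nat → Option (Option (Int × Int))
  | 0 => some none
  | fuel + 1 =>
    match PySem.List.pyGet? data (start + pos) with
    | none => none
    | some b =>
      if PySem.Int.band b 0x80 = 0 then
        some (some (pos + 1, PySem.Int.band b 0x7F))
      else
        match pvDecodeB data start (pos + 1) fuel with
        | none => none
        | some none => some none
        | some (some (p, v)) => some (some (p, PySem.Int.band b 0x7F + (v <<< (7 : Nat))))

def GetDynamicWireFormat_alt (data : List Int) (start : Int) (end_ : Int) : Option Int × Option Int × Option Int :=
  match PySem.List.pyGet? data start with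
  | none => (none, none, none)  -- data[start] raises IndexError: outside Pre_
  | some firstByte =>
    let wire_type := PySem.Int.band firstByte 0x7
    if PySem.Int.band firstByte 0x80 = 0 then
      (some (start + 1), some wire_type, some (firstByte >>> (3 : Nat)))
    else
      match pvDecodeB data start 0 (end_ - start).toNat with
      | none => (none, none, none)
      | some none => (none, none, none)
      | some (some (p, v)) => (some (start + p), some wire_type, some (v >>> (3 : Nat)))

-- ===== PRECONDITION & SPEC =====
-- Pre_ = exactly the inputs where Python A returns (no IndexError): data[start] must exist, and in
-- the multi-byte path the scan must hit the 'start+pos >= end' guard or a terminator byte while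
-- still inside the list.
def Pre_GetDynamicWireFormat (data : List Int) (start : Int) (end_ : Int) : Prop :=
  PySem.Raise.InRange data.length start ∧
  (PySem.Int.band (PySem.List.pyGetD data start 0) 0x80 = 0 ∨ end_ ≤ (data.length : Int) ∨
    ∃ k ∈ List.range (2 * data.length + 1),
      start + (k : Int) < end_ ∧ start + (k : Int) < (data.length : Int) ∧
      PySem.Int.band (PySem.List.pyGetD data (start + (k : Int)) 0) 0x80 = 0)
instance (data : List Int) (start : Int) (end_ : Int) : Decidable (Pre_GetDynamicWireFormat data start end_) := by unfold Pre_GetDynamicWireFormat; infer_instance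

def pvWitness_GetDynamicWireFormat : List Int × Int × Int := ([0x81, 0x03, 0x7F], 0, 3)

def Spec_GetDynamicWireFormat (data : List Int) (start : Int) (end_ : Int) (out : Option Int × Option Int × Option Int) : Prop := out = GetDynamicWireFormat_alt data start end_
instance (data : List Int) (start : Int) (end_ : Int) (out : Option Int × Option Int × Option Int) : Decidable (Spec_GetDynamicWireFormat data start end_ out) := by unfold Spec_GetDynamicWireFormat; infer_instance

-- ===== CLAIM (what is proved, stated in full; the proofs are below) =====
def Claim_equal_GetDynamicWireFormat : Prop := ∀ (data : List Int) (start : Int) (end_ : Int), Dom_GetDynamicWireFormat data start end_ → Pre_GetDynamicWireFormat data start end_ → Spec_GetDynamicWireFormat data start end_ (GetDynamicWireFormat data start end_)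

-- ===== LEMMAS AND PROOFS =====

-- little-endian value of a byte list: bl[0] is least significant
def pvLit : List Int → Int
  | [] => 0
  | b :: t => b + 128 * pvLit t

theorem pvLit_append_singleton (bl : List Int) (c : Int) :
    pvLit (bl ++ [c]) = pvLit bl + c * 128 ^ bl.length := by
  induction bl with
  | nil => simp [pvLit]
  | cons b t ih => simp [pvLit, ih, pow_succ]; ring

theorem pvRecon_eq_pvLit (bl : List Int) (acc : Int) :
    bl.reverse.foldl (fun (acc b : Int) => (acc <<< (7 : Nat)) + b) acc
      = acc * 128 ^ bl.length + pvLit bl := by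
  induction bl generalizing acc with
  | nil => simp [pvLit]
  | cons b t ih =>
    simp only [List.reverse_cons, List.foldl_append, List.foldl_cons, List.foldl_nil]
    rw [ih]
    simp only [Int.shiftLeft_eq, pvLit, List.length_cons, pow_succ]
    ring

-- A's scan with byteList `bl` already collected equals B's recursive decode from the same
-- position, with the decoded tail value spliced in above bl.
theorem pvLoopA_eq_decode (data : List Int) (start wire : Int) (fuel : Nat) :
    ∀ (bl : List Int) (pos : Int),
      pvLoopA data start wire bl pos fuel
        = (pvDecodeB data start pos fuel).map (fun r =>
            match r with
            | none => (none, none, none)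
            | some (p, v) =>
              (some (start + p), some wire,
                some ((pvLit bl + v * 128 ^ bl.length) >>> (3 : Nat)))) := by
  induction fuel with
  | zero => intro bl pos; rfl
  | succ fuel ih =>
    intro bl pos
    simp only [pvLoopA, pvDecodeB]
    cases h : PySem.List.pyGet? data (start + pos) with
    | none => rfl
    | some b =>
      by_cases hb : PySem.Int.band b 0x80 = 0
      · simp only [hb, if_pos, Option.map_some]
        rw [pvRecon_eq_pvLit, pvLit_append_singleton]
        simp
      · simp only [hb, if_neg, not_false_iff]
        rw [ih (bl ++ [PySem.Int.band b 0x7F]) (pos + 1)]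
        cases hr : pvDecodeB data start (pos + 1) fuel with
        | none => rfl
        | some r =>
          cases r with
          | none => rfl
          | some pv =>
            obtain ⟨p, v⟩ := pv
            simp only [Option.map_some]
            have : pvLit (bl ++ [PySem.Int.band b 0x7F]) +
                v * 128 ^ (bl ++ [PySem.Int.band b 0x7F]).length
                = pvLit bl + (PySem.Int.band b 0x7F + (v <<< (7 : Nat))) * 128 ^ bl.length := by
              rw [pvLit_append_singleton, Int.shiftLeft_eq,
                show ((2:Int)^(7:Nat)) = 128 by norm_num]
              simp [pow_succ]; ring
            rw [this]

theorem pvPorts_eq (data : List Int) (start end_ : Int) :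
    GetDynamicWireFormat data start end_ = GetDynamicWireFormat_alt data start end_ := by
  unfold GetDynamicWireFormat GetDynamicWireFormat_alt
  cases h : PySem.List.pyGet? data start with
  | none => rfl
  | some firstByte =>
    by_cases hb : PySem.Int.band firstByte 0x80 = 0
    · simp [hb]
    · simp only [hb, if_neg, not_false_iff]
      rw [pvLoopA_eq_decode data start (PySem.Int.band firstByte 0x7) (end_ - start).toNat [] 0]
      cases hr : pvDecodeB data start 0 (end_ - start).toNat with
      | none => rfl
      | some r =>
        cases r with
        | none => rfl
        | some pv =>
          obtain ⟨p, v⟩ := pv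
          simp [pvLit]

-- ===== VERDICT (by name: the statement is the Claim_ definition above) =====
theorem GetDynamicWireFormat_spec : Claim_equal_GetDynamicWireFormat := by
  intro data start end_ _ _
  unfold Spec_GetDynamicWireFormat
  exact pvPorts_eq data start end_
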